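-- pv_equiv track=rewrite | github.com/2JooYeon/codingtest-practice | Programmers/64061.py | solution
-- ===== SOURCE A (Python) =====
-- def solution(board, moves):
--     answer = 0
--     # 바구니
--     basket = []
--     graph = []
--     n = len(board)
--     # board를 열 단위로 스택으로 재생성
--     for j in range(n):
--         stack = []
--         for i in range(n - 1, -1, -1):
--             doll = board[i][j]
--             if doll == 0:
--                 break
--             stack.append(doll)
--         graph.append(stack)
--
--     for move in moves:
--         move -= 1
--         # 크레인이 집을 인형이 있다면
--         if graph[move]:
--             doll = graph[move].pop()
--             # 집은 인형과 바구니의 맨 위에 있는 인형이 같으면 인형을 터트린다.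
--             if basket and basket[-1] == doll:
--                 basket.pop()
--                 answer += 2
--             else:
--                 basket.append(doll)
--
--     return answer
-- ===== SOURCE B (Python) =====
-- def solution(board, moves):
--     n = len(board)
--     # pickable dolls per column, topmost first: the zero-free suffix of the column
--     cols = []
--     for j in range(n):
--         c = [board[i][j] for i in range(n)]
--         k = n - 1 - c[::-1].index(0) if 0 in c else -1
--         cols.append(c[k + 1:])
--     # phase 1: the sequence of picked dolls, via per-column pointers (board never written)
--     ptr = [0] * n
--     picked = []
--     for move in moves:
--         j = move - 1
--         p = ptr[j]
--         if p < len(cols[j]):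
--             picked.append(cols[j][p])
--             ptr[j] = p + 1
--     # phase 2: basket reduction over the picked sequence
--     answer = 0
--     basket = []
--     for d in picked:
--         if basket and basket[-1] == d:
--             basket.pop()
--             answer += 2
--         else:
--             basket.append(d)
--     return answer
-- ===== Notes on version B (the rewrite author's own statement) =====
-- stated objective: alternative
-- what changed: Instead of building mutable per-column stacks and popping them inside one interleaved loop, B extracts each column's zero-free suffix in closed form (last-zero index + slice), walks moves with a read-only per-column pointer array to produce the picked sequence, and then reduces that sequence with the basket in a separate pass.
-- outside the precondition, e.g. on solution([[5], [0, 0]], [1]): A returns 0, B raises IndexError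
import Mathlib
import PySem

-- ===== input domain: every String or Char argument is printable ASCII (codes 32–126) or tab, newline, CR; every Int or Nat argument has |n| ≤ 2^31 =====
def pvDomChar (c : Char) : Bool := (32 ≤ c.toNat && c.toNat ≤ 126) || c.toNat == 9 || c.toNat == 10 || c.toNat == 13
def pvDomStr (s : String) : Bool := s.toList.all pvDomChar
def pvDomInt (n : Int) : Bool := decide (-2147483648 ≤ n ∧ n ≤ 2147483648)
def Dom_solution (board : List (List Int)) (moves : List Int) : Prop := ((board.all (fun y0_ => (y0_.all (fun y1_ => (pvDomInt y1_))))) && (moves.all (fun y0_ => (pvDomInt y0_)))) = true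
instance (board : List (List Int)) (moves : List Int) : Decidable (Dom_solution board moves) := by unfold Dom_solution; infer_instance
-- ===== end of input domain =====

-- B replaces A's interleaved stack-popping simulation by a closed-form column suffix,
-- a pointer array and a separate basket pass (alternative decomposition, same cost).

-- board[i][j]; the default 0 is only reached out of range (Python IndexError), excluded by Pre_solution
def pvCell (board : List (List Int)) (i j : Int) : Int :=
  (((PySem.List.pyGet? board i).bind (fun r => PySem.List.pyGet? r j)).getD 0)

-- ===== PORT A =====
-- inner loop 'for i in range(n-1, -1, -1): doll = board[i][j]; if doll == 0: break; stack.append(doll)'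
-- ported as a structural countdown (fuel = number of remaining indices, current index = fuel-1)
def pvStackA (board : List (List Int)) (j : Int) : Nat → List Int → List Int
  | 0, stack => stack
  | i + 1, stack =>
    let doll := pvCell board (i : Int) j
    if doll = 0 then stack else pvStackA board j i (stack ++ [doll])

-- 'for move in moves:' loop of A over the state (graph, basket, answer)
def pvLoopA : List Int → List (List Int) → List Int → Int → Int
  | [], _, _, answer => answer
  | move :: rest, graph, basket, answer =>
    let m := move - 1
    let stack := PySem.List.pyGetD graph m []   -- graph[move]; in range under Pre_solution
    match stack.getLast? with
    | none => pvLoopA rest graph basket answer  -- 'if graph[move]:' false: skip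
    | some doll =>                              -- doll = graph[move].pop()
      let graph' := PySem.List.pySetD graph m stack.dropLast
      if basket.getLast? = some doll then       -- 'if basket and basket[-1] == doll'
        pvLoopA rest graph' basket.dropLast (answer + 2)
      else
        pvLoopA rest graph' (basket ++ [doll]) answer

def solution (board : List (List Int)) (moves : List Int) : Int :=
  let n := board.length
  let graph := (List.range n).map (fun j => pvStackA board (j : Int) n [])
  pvLoopA moves graph [] 0

-- ===== PORT B =====
-- cols[j]: c = [board[i][j] for i in range(n)]; k = n-1-c[::-1].index(0) if 0 in c else -1; c[k+1:]
def pvColB (board : List (List Int)) (n : Nat) (j : Int) : List Int :=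
  let c := (List.range n).map (fun i => pvCell board (i : Int) j)
  let k : Int := if 0 ∈ c then (n : Int) - 1 - ((PySem.List.index? c.reverse 0).getD 0 : Nat) else -1
  PySem.List.slice c (some (k + 1)) none

-- phase 1: 'for move in moves:' producing the picked sequence via the pointer list ptr
def pvPickLoop : List Int → List (List Int) → List Int → List Int → List Int
  | [], _, _, picked => picked
  | move :: rest, cols, ptr, picked =>
    let j := move - 1
    let p := PySem.List.pyGetD ptr j 0          -- ptr[j]; in range under Pre_solution
    let col := PySem.List.pyGetD cols j []      -- cols[j]; in range under Pre_solution
    if p < (col.length : Int) then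
      pvPickLoop rest cols (PySem.List.pySetD ptr j (p + 1)) (picked ++ [PySem.List.pyGetD col p 0])
    else
      pvPickLoop rest cols ptr picked

-- phase 2: 'for d in picked:' basket reduction
def pvBasket : List Int → List Int → Int → Int
  | [], _, answer => answer
  | d :: rest, basket, answer =>
    if basket.getLast? = some d then
      pvBasket rest basket.dropLast (answer + 2)
    else
      pvBasket rest (basket ++ [d]) answer

def solution_alt (board : List (List Int)) (moves : List Int) : Int :=
  let n := board.length
  let cols := (List.range n).map (fun j => pvColB board n (j : Int))
  pvBasket (pvPickLoop moves cols (List.replicate n (0 : Int)) []) [] 0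

-- ===== PRECONDITION & SPEC =====
-- Pre_ excludes inputs where Python raises IndexError: a row shorter than len(board)
-- (B always reads every column cell; A, too, except when zeros below shadow the short cell —
-- see cites), or a move outside [1-n, n] (graph[move-1] out of range in A, ptr[move-1] in B).
def Pre_solution (board : List (List Int)) (moves : List Int) : Prop :=
  (∀ row ∈ board, board.length ≤ row.length) ∧
  (∀ m ∈ moves, 1 - (board.length : Int) ≤ m ∧ m ≤ (board.length : Int))
instance (board : List (List Int)) (moves : List Int) : Decidable (Pre_solution board moves) := by
  unfold Pre_solution; infer_instance

def pvWitness_solution : List (List Int) × List Int := ([[0, 0], [1, 2]], [1, 2, 2, 1])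

def Spec_solution (board : List (List Int)) (moves : List Int) (out : Int) : Prop := out = solution_alt board moves
instance (board : List (List Int)) (moves : List Int) (out : Int) : Decidable (Spec_solution board moves out) := by unfold Spec_solution; infer_instance

-- ===== CLAIM (what is proved, stated in full; the proofs are below) =====
def Claim_equal_solution : Prop := ∀ (board : List (List Int)) (moves : List Int), Dom_solution board moves → Pre_solution board moves → Spec_solution board moves (solution board moves)


-- ===== LEMMAS AND PROOFS =====

-- pyIdx? facts
theorem pvIdx_lt {len t : Nat} {j : Int} (h : PySem.List.pyIdx? len j = some t) : t < len := by
  unfold PySem.List.pyIdx? at h; split_ifs at h <;> simp_all <;> omega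

theorem pvGetD_none {α : Type} (xs : List α) (j : Int) (d : α)
    (h : PySem.List.pyIdx? xs.length j = none) : PySem.List.pyGetD xs j d = d := by
  simp [PySem.List.pyGetD, PySem.List.pyGet?, h]

theorem pvGetD_some {α : Type} (xs : List α) (j : Int) (d : α) (t : Nat)
    (h : PySem.List.pyIdx? xs.length j = some t) (ht : t < xs.length) :
    PySem.List.pyGetD xs j d = xs[t] := by
  simp [PySem.List.pyGetD, PySem.List.pyGet?, h, List.getElem?_eq_getElem ht]

theorem pvSetD_some {α : Type} (xs : List α) (j : Int) (v : α) (t : Nat)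
    (h : PySem.List.pyIdx? xs.length j = some t) :
    PySem.List.pySetD xs j v = xs.set t v := by
  simp [PySem.List.pySetD, PySem.List.pySet?, h]

-- A's column stack is the takeWhile-nonzero of the reversed column prefix
theorem pvStackA_eq (board : List (List Int)) (j : Int) :
    ∀ (m : Nat) (stack : List Int),
      pvStackA board j m stack =
        stack ++ (((List.range m).map (fun i => pvCell board (i : Int) j)).reverse.takeWhile (fun d => d != 0)) := by
  intro m
  induction m with
  | zero => intro stack; simp [pvStackA]
  | succ m ih =>
    intro stack
    rw [pvStackA]
    by_cases h : pvCell board (m : Int) j = 0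
    · rw [if_pos h]
      simp [List.range_succ, List.takeWhile_cons, h]
    · rw [if_neg h, ih]
      simp [List.range_succ, List.takeWhile_cons, h, List.append_assoc]

-- takeWhile-nonzero equals take-up-to-the-first-zero
theorem pvTakeWhile_eq_take (l : List Int) :
    ∀ (k : Nat) (hk : k < l.length), l[k] = 0 → (∀ j (hj : j < k), l[j]'(by omega) ≠ 0) →
      l.takeWhile (fun d => d != 0) = l.take k := by
  induction l with
  | nil => intro k hk; simp at hk
  | cons a l ih =>
    intro k hk h0 hlt
    cases k with
    | zero => simp_all [List.takeWhile_cons]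
    | succ k =>
      have ha : a ≠ 0 := by
        have := hlt 0 (Nat.succ_pos k); simpa using this
      simp only [List.takeWhile_cons, List.take_succ_cons]
      rw [if_pos (by simpa [bne_iff_ne] using ha)]
      congr 1
      exact ih k (by simpa using hk) (by simpa using h0)
        (fun j hj => by have := hlt (j+1) (by omega); simpa using this)

-- B's column equals A's stack, reversed
theorem pvColB_eq (board : List (List Int)) (n : Nat) (j : Int) :
    pvColB board n j =
      (((List.range n).map (fun i => pvCell board (i : Int) j)).reverse.takeWhile (fun d => d != 0)).reverse := by
  unfold pvColB
  dsimp only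
  set c := (List.range n).map (fun i => pvCell board (i : Int) j) with hc
  have hlen : c.length = n := by simp [hc]
  by_cases hmem : (0 : Int) ∈ c
  · have hmem' : (0 : Int) ∈ c.reverse := by simpa using hmem
    obtain ⟨k, hk⟩ := Option.isSome_iff_exists.mp ((PySem.List.index?_isSome_iff c.reverse 0).mpr hmem')
    have hk' := hk
    rw [PySem.List.index?_eq_idxOf?, List.idxOf?_eq_some_iff] at hk'
    obtain ⟨hklen, hk0, hkmin⟩ := hk'
    have hkn : k < n := by simpa [hlen] using hklen
    have htw : c.reverse.takeWhile (fun d => d != 0) = c.reverse.take k :=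
      pvTakeWhile_eq_take c.reverse k hklen hk0 (fun j hj => hkmin j hj)
    rw [if_pos hmem, hk, htw]
    have harg : (n : Int) - 1 - ((Option.some k).getD 0 : Nat) + 1 = ((n - k : Nat) : Int) := by
      simp only [Option.getD_some]; omega
    rw [harg, PySem.List.slice_from_natCast]
    rw [List.reverse_take, List.reverse_reverse, List.length_reverse, hlen]
  · rw [if_neg hmem]
    have harg : (-1 : Int) + 1 = 0 := by norm_num
    rw [harg, PySem.List.slice_zero_start, PySem.List.slice_none_none]
    have htw : c.reverse.takeWhile (fun d => d != 0) = c.reverse := by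
      rw [List.takeWhile_eq_self_iff]
      intro x hx
      simp only [bne_iff_ne, ne_eq]
      intro h; subst h; exact hmem (List.mem_reverse.mp hx)
    rw [htw, List.reverse_reverse]

-- the picked accumulator is a pure prefix
theorem pvPickLoop_prefix :
    ∀ (moves : List Int) (cols : List (List Int)) (ptr picked : List Int),
      pvPickLoop moves cols ptr picked = picked ++ pvPickLoop moves cols ptr [] := by
  intro moves
  induction moves with
  | nil => intro cols ptr picked; simp [pvPickLoop]
  | cons move rest ih =>
    intro cols ptr picked
    rw [pvPickLoop, pvPickLoop]
    split
    · rw [ih _ _ (picked ++ _), ih _ _ ([] ++ _)]; simp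
    · exact ih _ _ _

-- main loop correspondence under the pointer invariant
theorem pvLoop_eq :
    ∀ (moves : List Int) (graph cols : List (List Int)) (ptr basket : List Int) (answer : Int),
      graph.length = cols.length → ptr.length = cols.length →
      (∀ t (ht : t < cols.length), ∃ p : Nat,
          ptr[t]? = some ((p : Nat) : Int) ∧ graph[t]? = some (((cols[t]'ht).drop p).reverse)) →
      pvLoopA moves graph basket answer = pvBasket (pvPickLoop moves cols ptr []) basket answer := by
  intro moves
  induction moves with
  | nil => intro graph cols ptr basket answer _ _ _; rfl
  | cons move rest ih =>
    intro graph cols ptr basket answer hg hp hinv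
    rw [pvLoopA, pvPickLoop]
    dsimp only
    rcases hidx : PySem.List.pyIdx? cols.length (move - 1) with _ | t
    · -- index out of range: both sides skip the move
      have hgn : PySem.List.pyGetD graph (move - 1) ([] : List Int) = [] :=
        pvGetD_none _ _ _ (by rw [hg]; exact hidx)
      have hpn : PySem.List.pyGetD ptr (move - 1) (0 : Int) = 0 :=
        pvGetD_none _ _ _ (by rw [hp]; exact hidx)
      have hcn : PySem.List.pyGetD cols (move - 1) ([] : List Int) = [] :=
        pvGetD_none _ _ _ hidx
      rw [hgn, hpn, hcn]
      simp only [List.getLast?_nil, List.length_nil, Nat.cast_zero, lt_irrefl, if_neg (lt_irrefl (0:Int))]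
      exact ih graph cols ptr basket answer hg hp hinv
    · have ht : t < cols.length := pvIdx_lt hidx
      obtain ⟨p, hpt, hgt⟩ := hinv t ht
      have htg : t < graph.length := by omega
      have htp : t < ptr.length := by omega
      have hgt' : graph[t]'htg = ((cols[t]'ht).drop p).reverse := by
        have := hgt; rwa [List.getElem?_eq_getElem htg, Option.some_inj] at this
      have hpt' : ptr[t]'htp = ((p : Nat) : Int) := by
        have := hpt; rwa [List.getElem?_eq_getElem htp, Option.some_inj] at this
      have hgv : PySem.List.pyGetD graph (move - 1) ([] : List Int) = ((cols[t]'ht).drop p).reverse := by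
        rw [pvGetD_some _ _ _ t (by rw [hg]; exact hidx) htg]; exact hgt'
      have hpv : PySem.List.pyGetD ptr (move - 1) (0 : Int) = ((p : Nat) : Int) := by
        rw [pvGetD_some _ _ _ t (by rw [hp]; exact hidx) htp]; exact hpt'
      have hcv : PySem.List.pyGetD cols (move - 1) ([] : List Int) = cols[t]'ht :=
        pvGetD_some _ _ _ t hidx ht
      rw [hgv, hpv, hcv]
      by_cases hplt : p < (cols[t]'ht).length
      · -- a doll is picked
        have hlast : (((cols[t]'ht).drop p).reverse).getLast? = some ((cols[t]'ht)[p]'hplt) := by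
          rw [List.getLast?_reverse, List.head?_drop, List.getElem?_eq_getElem hplt]
        rw [hlast]
        dsimp only
        rw [if_pos (show ((p : Nat) : Int) < (((cols[t]'ht).length : Nat) : Int) by exact_mod_cast hplt)]
        have hdoll : PySem.List.pyGetD (cols[t]'ht) ((p : Nat) : Int) (0 : Int) = (cols[t]'ht)[p]'hplt := by
          rw [PySem.List.pyGetD_natCast, List.getD_eq_getElem _ _ hplt]
        have hset : PySem.List.pySetD ptr (move - 1) (((p : Nat) : Int) + 1) = ptr.set t (((p : Nat) : Int) + 1) :=
          pvSetD_some _ _ _ t (by rw [hp]; exact hidx)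
        have hsetg : PySem.List.pySetD graph (move - 1) ((((cols[t]'ht).drop p).reverse).dropLast)
            = graph.set t ((((cols[t]'ht).drop p).reverse).dropLast) :=
          pvSetD_some _ _ _ t (by rw [hg]; exact hidx)
        rw [hdoll, hset, hsetg, pvPickLoop_prefix rest cols _ ([] ++ [(cols[t]'ht)[p]'hplt])]
        have hinv' : ∀ t' (ht' : t' < cols.length), ∃ q : Nat,
            (ptr.set t (((p : Nat) : Int) + 1))[t']? = some ((q : Nat) : Int) ∧
            (graph.set t ((((cols[t]'ht).drop p).reverse).dropLast))[t']? = some (((cols[t']'ht').drop q).reverse) := by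
          intro t' ht'
          by_cases hteq : t = t'
          · subst hteq
            refine ⟨p + 1, ?_, ?_⟩
            · rw [List.getElem?_set_self htp]; push_cast; ring_nf
            · rw [List.getElem?_set_self htg, List.dropLast_reverse, List.tail_drop]
          · obtain ⟨q, hq1, hq2⟩ := hinv t' ht'
            exact ⟨q, by rw [List.getElem?_set_ne hteq]; exact hq1,
                     by rw [List.getElem?_set_ne hteq]; exact hq2⟩
        have hbstep : ∀ (d : Int) (l basket : List Int) (answer : Int),
            pvBasket (d :: l) basket answer =
              if basket.getLast? = some d then pvBasket l basket.dropLast (answer + 2)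
              else pvBasket l (basket ++ [d]) answer := fun _ _ _ _ => rfl
        rw [List.nil_append, List.singleton_append, hbstep]
        by_cases hb : basket.getLast? = some ((cols[t]'ht)[p]'hplt)
        · rw [if_pos hb, if_pos hb,
            ih _ cols _ _ _ (by simpa using hg) (by simpa using hp) hinv']
        · rw [if_neg hb, if_neg hb,
            ih _ cols _ _ _ (by simpa using hg) (by simpa using hp) hinv']
      · -- column exhausted: both sides skip
        have hdrop : (cols[t]'ht).drop p = [] := List.drop_eq_nil_of_le (by omega)
        rw [hdrop]
        simp only [List.reverse_nil, List.getLast?_nil]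
        rw [if_neg (by exact_mod_cast hplt)]
        exact ih graph cols ptr basket answer hg hp hinv

-- ===== VERDICT (by name: the statement is the Claim_ definition above) =====
theorem solution_spec : Claim_equal_solution := by
  intro board moves hdom hpre
  unfold Spec_solution solution solution_alt
  apply pvLoop_eq
  · simp
  · simp
  · intro t ht
    have ht' : t < board.length := by simpa using ht
    refine ⟨0, ?_, ?_⟩
    · simp [List.getElem?_replicate, ht']
    · simp only [List.pure_def, List.bind_eq_flatMap, ← List.map_eq_flatMap,
        List.getElem?_map, List.getElem_map, List.getElem?_range, List.getElem_range,
        ht', if_pos, List.drop_zero, Option.map_some]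
      rw [pvColB_eq, List.reverse_reverse, pvStackA_eq]
      simp
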